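-- pv_equiv track=rewrite | github.com/arun1011/Code_Repo | PY_Files/ai_textclass.py | ngram_compile
-- ===== SOURCE A (Python) =====
-- def ngram_compile(text_seq,n):
--     txt_list=text_seq.split()
--     ngram_list=[]; temp_list=[]
--     txt_len=len(txt_list)
--     for x in range(txt_len):
--         for m in range(n+1):
--             if m<=0: continue
--             ngram=""
--             for y in range(m):
--                 if x+y >= txt_len: break
--                 ngram=ngram+" "+txt_list[x+y]
--             temp_list.append(ngram.strip())
--     for w in temp_list:
--         if w not in ngram_list:
--             ngram_list.append(w)
--     return ngram_list
-- ===== SOURCE B (Python) =====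
-- def ngram_compile(text_seq, n):
--     words = text_seq.split()
--     L = len(words)
--     seen = set()
--     out = []
--     for x in range(L):
--         g = ""
--         for y in range(x, min(x + n, L)):
--             g = words[y] if g == "" else g + " " + words[y]
--             if g not in seen:
--                 seen.add(g)
--                 out.append(g)
--     return out
-- ===== Notes on version B (the rewrite author's own statement) =====
-- stated objective: faster
-- what changed: Each n-gram is built by extending the previous one by one word and deduplicated on the fly with a hash set, instead of rebuilding every n-gram from scratch (quadratic in n) and then deduplicating with a quadratic list-membership scan.
import Mathlib
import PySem

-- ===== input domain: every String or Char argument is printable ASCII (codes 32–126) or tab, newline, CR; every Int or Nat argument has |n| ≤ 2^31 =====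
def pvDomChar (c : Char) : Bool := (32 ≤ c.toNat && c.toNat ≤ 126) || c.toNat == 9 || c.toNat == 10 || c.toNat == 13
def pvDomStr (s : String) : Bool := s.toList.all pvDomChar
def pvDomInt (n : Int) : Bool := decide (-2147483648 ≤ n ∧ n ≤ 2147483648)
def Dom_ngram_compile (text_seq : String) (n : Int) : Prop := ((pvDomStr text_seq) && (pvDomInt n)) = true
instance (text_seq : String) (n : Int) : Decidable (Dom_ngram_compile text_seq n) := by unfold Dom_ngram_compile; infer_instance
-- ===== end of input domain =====

-- B builds each n-gram by extending the previous one by one word and dedups on the fly with a set,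
-- instead of rebuilding every n-gram from scratch and deduplicating by a quadratic list scan (objective: faster).

-- ===== PORT A =====
-- inner loop 'for y in range(m): if x+y >= txt_len: break; ngram = ngram + " " + txt_list[x+y]'
def pvBuild (txt : List String) (L x : Int) : Nat → Int → String → String
  | 0, _, ngram => ngram
  | fuel+1, y, ngram =>
      if L ≤ x + y then ngram
      else pvBuild txt L x fuel (y + 1) (ngram ++ " " ++ PySem.List.pyGetD txt (x + y) "")
def ngram_compile (text_seq : String) (n : Int) : List String :=
  let txt_list := PySem.Str.split₀ text_seq
  let txt_len : Int := (txt_list.length : Int)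
  let temp_list := (PySem.List.pyRange 0 txt_len 1).foldl
    (fun temp x =>
      (PySem.List.pyRange 0 (n + 1) 1).foldl
        (fun temp m =>
          if m ≤ 0 then temp
          else temp ++ [PySem.Str.strip (pvBuild txt_list txt_len x m.toNat 0 "")]) temp) []
  temp_list.foldl (fun ngram_list w => if w ∈ ngram_list then ngram_list else ngram_list ++ [w]) []

-- ===== PORT B =====
def ngram_compile_alt (text_seq : String) (n : Int) : List String :=
  let words := PySem.Str.split₀ text_seq
  let L : Int := (words.length : Int)
  let st := (PySem.List.pyRange 0 L 1).foldl
    (fun (st : PySem.Set String × List String) x =>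
      ((PySem.List.pyRange x (min (x + n) L) 1).foldl
        (fun (st2 : String × PySem.Set String × List String) y =>
          let w := PySem.List.pyGetD words y ""
          let g := if st2.1 = "" then w else st2.1 ++ " " ++ w
          if g ∈ st2.2.1 then (g, st2.2.1, st2.2.2)
          else (g, PySem.Set.add st2.2.1 g, st2.2.2 ++ [g]))
        ("", st.1, st.2)).2)
    (PySem.Set.empty, [])
  st.2


-- ===== PRECONDITION & SPEC =====
def Spec_ngram_compile (text_seq : String) (n : Int) (out : List String) : Prop := out = ngram_compile_alt text_seq n
instance (text_seq : String) (n : Int) (out : List String) : Decidable (Spec_ngram_compile text_seq n out) := by unfold Spec_ngram_compile; infer_instance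

-- ===== CLAIM (what is proved, stated in full; the proofs are below) =====
def Claim_equal_ngram_compile : Prop := ∀ (text_seq : String) (n : Int), Dom_ngram_compile text_seq n → Spec_ngram_compile text_seq n (ngram_compile text_seq n)

-- ===== LEMMAS AND PROOFS =====

def dedupF (acc l : List String) : List String :=
  l.foldl (fun a w => if w ∈ a then a else a ++ [w]) acc
def win (txt : List String) (x len : Nat) : List String := (txt.drop x).take len
def bcat (acc : String) (ws : List String) : String := ws.foldl (fun a w => a ++ " " ++ w) acc
def sj : List String → String
  | [] => ""
  | w :: t => bcat w t
def goodL (txt : List String) : Prop :=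
  ∀ w ∈ txt, w.toList ≠ [] ∧ ∀ c ∈ w.toList, PySem.Chars.isspace c = false

def blockB (txt : List String) (N x : Nat) : List String :=
  (List.range (min N (txt.length - x))).map (fun j => sj (win txt x (j+1)))
def canon (txt : List String) (N : Nat) : List String :=
  (List.range txt.length).foldl (fun acc x => dedupF acc (blockB txt N x)) []

theorem go_good : ∀ (s cur : List Char) (acc : List (List Char)),
    (∀ c ∈ cur, PySem.Chars.isspace c = false) →
    (∀ w ∈ acc, w ≠ [] ∧ ∀ c ∈ w, PySem.Chars.isspace c = false) →
    ∀ w ∈ PySem.Chars.split₀.go s cur acc, w ≠ [] ∧ ∀ c ∈ w, PySem.Chars.isspace c = false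
  | [], cur, acc, hcur, hacc => by
    simp only [PySem.Chars.split₀.go]
    split
    · intro w hw; exact hacc w (List.mem_reverse.mp hw)
    · intro w hw
      rw [List.mem_reverse] at hw
      rcases List.mem_cons.mp hw with h | h
      · subst h
        constructor
        · simp_all [List.isEmpty_iff]
        · intro c hc; exact hcur c (List.mem_reverse.mp hc)
      · exact hacc w h
  | c :: rest, cur, acc, hcur, hacc => by
    simp only [PySem.Chars.split₀.go]
    split
    · split
      · exact go_good rest [] acc (by simp) hacc
      · refine go_good rest [] (cur.reverse :: acc) (by simp) ?_
        intro w hw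
        rcases List.mem_cons.mp hw with h | h
        · subst h
          refine ⟨by simp_all [List.isEmpty_iff], ?_⟩
          intro d hd; exact hcur d (List.mem_reverse.mp hd)
        · exact hacc w h
    · rename_i hc
      refine go_good rest (c :: cur) acc ?_ hacc
      intro d hd
      rcases List.mem_cons.mp hd with h | h
      · subst h; simpa using hc
      · exact hcur d h

theorem goodL_split₀ (s : String) : goodL (PySem.Str.split₀ s) := by
  intro w hw
  rw [PySem.Str.split₀] at hw
  rcases List.mem_map.mp hw with ⟨cs, hcs, rfl⟩
  rw [String.toList_ofList]
  exact go_good s.toList [] [] (by simp) (by simp) cs hcs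


theorem dedupF_append (acc l1 l2 : List String) :
    dedupF acc (l1 ++ l2) = dedupF (dedupF acc l1) l2 := List.foldl_append ..

theorem mem_dedupF (acc l : List String) (a : String) (h : a ∈ acc ∨ a ∈ l) :
    a ∈ dedupF acc l := by
  induction l generalizing acc with
  | nil => simpa [dedupF] using h
  | cons w t ih =>
    rw [dedupF, List.foldl_cons]
    show a ∈ dedupF (if w ∈ acc then acc else acc ++ [w]) t
    apply ih
    rcases h with h | h
    · left; split <;> simp [h]
    · rcases List.mem_cons.mp h with rfl | h
      · left; split <;> simp_all
      · right; exact h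

theorem dedupF_replicate (acc : List String) (a : String) (j : Nat) (h : a ∈ acc) :
    dedupF acc (List.replicate j a) = acc := by
  induction j with
  | zero => rfl
  | succ k ih =>
    rw [List.replicate_succ, dedupF, List.foldl_cons, if_pos h]
    exact ih

theorem dedupF_flatMap {α : Type} (xs : List α) (g : α → List String) (acc : List String) :
    dedupF acc (xs.flatMap g) = xs.foldl (fun a x => dedupF a (g x)) acc := by
  induction xs generalizing acc with
  | nil => rfl
  | cons x t ih => rw [List.flatMap_cons, dedupF_append, List.foldl_cons, ih]

theorem toList_bcat (acc : String) (ws : List String) :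
    (bcat acc ws).toList = acc.toList ++ ws.flatMap (fun w => ' ' :: w.toList) := by
  induction ws generalizing acc with
  | nil => simp [bcat]
  | cons w t ih =>
    rw [bcat, List.foldl_cons]
    show (bcat (acc ++ " " ++ w) t).toList = _
    rw [ih]
    simp [String.toList_append]

theorem bcat_snoc (acc u : String) (ws : List String) :
    bcat acc (ws ++ [u]) = bcat acc ws ++ " " ++ u := by
  rw [bcat, List.foldl_append]; rfl

theorem sj_snoc (ws : List String) (u : String) (h : ws ≠ []) :
    sj (ws ++ [u]) = sj ws ++ " " ++ u := by
  cases ws with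
  | nil => exact absurd rfl h
  | cons w t => rw [List.cons_append, sj, sj, bcat_snoc]

theorem toList_sj (w : String) (t : List String) :
    (sj (w :: t)).toList = w.toList ++ t.flatMap (fun u => ' ' :: u.toList) := by
  rw [sj, toList_bcat]

theorem sj_ne_empty (ws : List String) (h : ws ≠ [])
    (hg : ∀ w ∈ ws, w.toList ≠ []) : sj ws ≠ "" := by
  cases ws with
  | nil => exact absurd rfl h
  | cons w t =>
    intro he
    have := congrArg String.toList he
    rw [toList_sj] at this
    have hw := hg w (by simp)
    cases hwl : w.toList with
    | nil => exact hw hwl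
    | cons c cs => rw [hwl] at this; simp at this

-- last char of a good flat gram is nonspace: rstrip is identity
theorem rstrip_flat (ws : List String) (hg : ∀ w ∈ ws, w.toList ≠ [] ∧ ∀ c ∈ w.toList, PySem.Chars.isspace c = false) :
    ∀ (l : List Char), l ≠ [] → (∀ (h : l ≠ []), PySem.Chars.isspace (l.getLast h) = false) →
    PySem.Chars.rstrip (l ++ ws.flatMap (fun w => ' ' :: w.toList)) = l ++ ws.flatMap (fun w => ' ' :: w.toList) := by
  induction ws with
  | nil =>
    intro l hl hlast
    simp only [List.flatMap_nil, List.append_nil]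
    rw [PySem.Chars.rstrip]
    have : l.reverse = l.getLast hl :: l.dropLast.reverse := by
      rw [List.reverse_eq_iff]; simp [List.dropLast_concat_getLast hl]
    rw [this, List.dropWhile_cons, hlast hl]
    simp [← this]
  | cons w t ih =>
    intro l hl hlast
    have hw := hg w (by simp)
    have hne : l ++ (' ' :: w.toList) ≠ [] := by simp
    have : l ++ (w :: t).flatMap (fun w => ' ' :: w.toList)
         = (l ++ (' ' :: w.toList)) ++ t.flatMap (fun w => ' ' :: w.toList) := by simp
    rw [this]
    refine ih (fun u hu => hg u (by simp [hu])) _ hne ?_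
    intro h
    have h2 : (' ' :: w.toList) ≠ [] := by simp
    rw [List.getLast_append_of_ne_nil h h2, List.getLast_cons hw.1]
    exact hw.2 _ (List.getLast_mem _)

theorem strip_bcat (ws : List String)
    (hg : ∀ w ∈ ws, w.toList ≠ [] ∧ ∀ c ∈ w.toList, PySem.Chars.isspace c = false) :
    PySem.Str.strip (bcat "" ws) = sj ws := by
  apply String.toList_inj.mp
  rw [PySem.Str.toList_strip, toList_bcat]
  cases ws with
  | nil => rfl
  | cons w t =>
    have hw := hg w (by simp)
    rw [toList_sj]
    show PySem.Chars.strip ([] ++ (' ' :: w.toList) ++ t.flatMap fun u => ' ' :: u.toList) = _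
    rw [PySem.Chars.strip, PySem.Chars.lstrip]
    cases hwl : w.toList with
    | nil => exact absurd hwl hw.1
    | cons c cs =>
      simp only [List.nil_append, List.cons_append, List.dropWhile_cons]
      rw [if_pos (by decide), if_neg (by rw [hw.2 c (by simp [hwl])]; simp)]
      have := rstrip_flat t (fun u hu => hg u (by simp [hu])) (c :: cs)
        (by simp) (fun h => hw.2 _ (by rw [hwl]; exact List.getLast_mem _))
      rw [← List.cons_append, this]
theorem pvBuild_eq (txt : List String) : ∀ (fuel : Nat) (x y : Nat) (acc : String),
    pvBuild txt (txt.length : Int) (x : Int) fuel (y : Int) acc = bcat acc (win txt (x+y) fuel)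
  | 0, x, y, acc => by simp [pvBuild, win, bcat]
  | fuel+1, x, y, acc => by
    rw [pvBuild]
    by_cases h : txt.length ≤ x + y
    · rw [if_pos (by exact_mod_cast h)]
      have : txt.drop (x+y) = [] := List.drop_eq_nil_of_le h
      simp [win, this, bcat]
    · rw [Nat.not_le] at h
      rw [if_neg (by omega)]
      have hget : PySem.List.pyGetD txt ((x : Int) + (y : Int)) "" = txt[x+y] := by
        rw [show (x : Int) + (y : Int) = ((x+y : Nat) : Int) by push_cast; ring,
            PySem.List.pyGetD_natCast]
        exact List.getD_eq_getElem txt _ h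
      have hrec : ((y : Int) + 1) = ((y+1 : Nat) : Int) := by push_cast; ring
      rw [hget, hrec, pvBuild_eq txt fuel x (y+1)]
      have hxy : x + (y+1) = x + y + 1 := by omega
      have hwin : win txt (x+y) (fuel+1) = txt[x+y] :: win txt (x+(y+1)) fuel := by
        rw [win, win, hxy, ← List.getElem_cons_drop (h : x+y < txt.length), List.take_succ_cons]
      rw [hwin]
      rfl

theorem good_win (txt : List String) (hg : goodL txt) (x len : Nat) :
    ∀ w ∈ win txt x len, w.toList ≠ [] ∧ ∀ c ∈ w.toList, PySem.Chars.isspace c = false :=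
  fun w hw => hg w (List.mem_of_mem_drop (List.mem_of_mem_take hw))

theorem dedup_block (txt : List String) (N x : Nat) (hx : x < txt.length) (acc : List String) :
    dedupF acc ((List.range N).map (fun i => sj (win txt x (i+1)))) = dedupF acc (blockB txt N x) := by
  set k := min N (txt.length - x) with hk
  have hkN : k ≤ N := Nat.min_le_left _ _
  have hsplit : List.range N = List.range k ++ (List.range (N-k)).map (fun i => k + i) := by
    rw [← List.range_add, Nat.add_sub_cancel' hkN]
  rw [hsplit, List.map_append, dedupF_append]
  have hconst : ∀ i ∈ List.range (N-k), ((fun i => sj (win txt x (i+1))) ∘ (fun i => k + i)) i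
      = sj (win txt x k) := by
    intro i hi
    rw [List.mem_range] at hi
    have hkk : k = txt.length - x := by omega
    have hlen : (txt.drop x).length ≤ k + i + 1 := by
      rw [List.length_drop]; omega
    have hlen' : (txt.drop x).length ≤ k := by rw [List.length_drop]; omega
    show sj (win txt x (k + i + 1)) = sj (win txt x k)
    rw [win, win, List.take_of_length_le hlen, List.take_of_length_le hlen']
  have hrepl : ((List.range (N-k)).map (fun i => k + i)).map (fun i => sj (win txt x (i+1)))
      = List.replicate (N-k) (sj (win txt x k)) := by
    rw [List.map_map, List.map_congr_left hconst, List.map_const', List.length_range]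
  rw [hrepl]
  rcases Nat.eq_zero_or_pos (N - k) with h0 | hpos
  · rw [h0]; rfl
  · have hk1 : 1 ≤ k := by omega
    refine dedupF_replicate _ _ _ (mem_dedupF _ _ _ (Or.inr ?_))
    show sj (win txt x k) ∈ (List.range k).map (fun j => sj (win txt x (j+1)))
    exact List.mem_map.mpr ⟨k-1, by rw [List.mem_range]; omega, by rw [Nat.sub_add_cancel hk1]⟩

theorem filt_range (n : Int) :
    (PySem.List.pyRange 0 (n+1) 1).filter (fun m => decide ¬ (m ≤ 0))
      = (List.range n.toNat).map (fun i => ((i+1 : Nat) : Int)) := by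
  by_cases hn : (0 : Int) ≤ n
  · obtain ⟨N, rfl⟩ := Int.eq_ofNat_of_zero_le hn
    rw [show ((N : Int) + 1) = ((N+1 : Nat) : Int) by push_cast; ring, PySem.List.pyRange_zero_natCast]
    rw [List.filter_map, show N + 1 = 1 + N by omega, List.range_add, List.filter_append,
        List.map_append, Int.toNat_natCast]
    have h1 : ((List.range 1).filter ((fun (m : Int) => decide ¬ (m ≤ 0)) ∘ (fun k : Nat => (k : Int)))).map (fun k : Nat => (k : Int)) = [] := by decide
    rw [h1, List.nil_append, List.filter_map,
        List.filter_eq_self.mpr (fun a ha => by simp; omega), List.map_map]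
    exact List.map_congr_left (fun i _ => by simp [Nat.add_comm])
  · have hlt : ¬ (0 : Int) < n + 1 := by omega
    rw [PySem.List.pyRange_of_pos 0 (n+1) (s := 1) (by norm_num), if_neg hlt]
    have : n.toNat = 0 := by omega
    simp [this]

theorem A_eq_canon (text_seq : String) (n : Int) :
    ngram_compile text_seq n = canon (PySem.Str.split₀ text_seq) n.toNat := by
  unfold ngram_compile
  set txt := PySem.Str.split₀ text_seq with htxt
  have hg := goodL_split₀ text_seq
  rw [← htxt] at hg
  show dedupF [] _ = _
  have hinner : ∀ (temp : List String) (x : Int),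
      (PySem.List.pyRange 0 (n+1) 1).foldl
        (fun temp m => if m ≤ 0 then temp
          else temp ++ [PySem.Str.strip (pvBuild txt (txt.length : Int) x m.toNat 0 "")]) temp
      = temp ++ ((PySem.List.pyRange 0 (n+1) 1).filter (fun m => decide ¬ (m ≤ 0))).map
          (fun m => PySem.Str.strip (pvBuild txt (txt.length : Int) x m.toNat 0 "")) := by
    intro temp x
    rw [PySem.List.foldl_congr_mem _ _
      (fun temp m => if ¬ (m ≤ 0) then temp ++ [PySem.Str.strip (pvBuild txt (txt.length : Int) x m.toNat 0 "")] else temp)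
      _ (fun acc m _ => by by_cases hm : m ≤ 0 <;> simp [hm])]
    exact PySem.List.foldl_append_ite _ _ _ _
  rw [PySem.List.foldl_congr_mem _ _
    (fun temp x => temp ++ ((PySem.List.pyRange 0 (n+1) 1).filter (fun m => decide ¬ (m ≤ 0))).map
          (fun m => PySem.Str.strip (pvBuild txt (txt.length : Int) x m.toNat 0 "")))
    _ (fun acc x _ => hinner acc x)]
  rw [PySem.List.foldl_append_eq_flatMap, List.nil_append, dedupF_flatMap]
  rw [PySem.List.pyRange_zero_natCast, List.foldl_map]
  refine PySem.List.foldl_congr_mem _ _ _ _ (fun acc x hx => ?_)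
  rw [List.mem_range] at hx
  rw [filt_range, List.map_map]
  have hmap : ∀ i : Nat, PySem.Str.strip (pvBuild txt (txt.length : Int) (x : Int) ((( i+1 : Nat) : Int)).toNat 0 "")
      = sj (win txt x (i+1)) := by
    intro i
    rw [Int.toNat_natCast]
    rw [show ((0 : Int)) = ((0 : Nat) : Int) by rfl, pvBuild_eq txt (i+1) x 0]
    rw [Nat.add_zero]
    exact strip_bcat _ (good_win txt hg x (i+1))
  have hmm : List.map ((fun m => PySem.Str.strip (pvBuild txt (txt.length : Int) (x : Int) m.toNat 0 "")) ∘ fun i => ((i+1 : Nat) : Int)) (List.range n.toNat)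
      = List.map (fun i => sj (win txt x (i+1))) (List.range n.toNat) :=
    List.map_congr_left (fun i _ => hmap i)
  rw [hmm]
  exact dedup_block txt n.toNat x hx acc
def nextg (words : List String) (g : String) (y : Int) : String :=
  if g = "" then PySem.List.pyGetD words y "" else g ++ " " ++ PySem.List.pyGetD words y ""

def gvals (words : List String) : List Int → String → List String
  | [], _ => []
  | y :: ys, g => nextg words g y :: gvals words ys (nextg words g y)

def stepB (words : List String) (st2 : String × PySem.Set String × List String) (y : Int) :
    String × PySem.Set String × List String :=
  let w := PySem.List.pyGetD words y ""
  let g := if st2.1 = "" then w else st2.1 ++ " " ++ w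
  if g ∈ st2.2.1 then (g, st2.2.1, st2.2.2)
  else (g, PySem.Set.add st2.2.1 g, st2.2.2 ++ [g])

theorem stepB_pos (words : List String) (g : String) (o : List String) (y : Int)
    (h : nextg words g y ∈ o) : stepB words (g, o, o) y = (nextg words g y, o, o) := by
  show (if nextg words g y ∈ o then (nextg words g y, o, o)
        else (nextg words g y, PySem.Set.add o (nextg words g y), o ++ [nextg words g y])) = _
  rw [if_pos h]

theorem stepB_neg (words : List String) (g : String) (o : List String) (y : Int)
    (h : nextg words g y ∉ o) :
    stepB words (g, o, o) y = (nextg words g y, o ++ [nextg words g y], o ++ [nextg words g y]) := by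
  show (if nextg words g y ∈ o then (nextg words g y, o, o)
        else (nextg words g y, PySem.Set.add o (nextg words g y), o ++ [nextg words g y])) = _
  rw [if_neg h, PySem.Set.add, if_neg (by simpa using fun hc => h (List.contains_iff_mem.mp hc))]

theorem innerB_fold (words : List String) : ∀ (ys : List Int) (g : String) (o : List String),
    ys.foldl (stepB words) (g, o, o)
    = (ys.foldl (nextg words) g, dedupF o (gvals words ys g), dedupF o (gvals words ys g))
  | [], g, o => rfl
  | y :: ys, g, o => by
    rw [List.foldl_cons, List.foldl_cons]
    by_cases hmem : nextg words g y ∈ o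
    · rw [stepB_pos words g o y hmem, innerB_fold words ys (nextg words g y) o]
      have hd : dedupF o (gvals words (y :: ys) g) = dedupF o (gvals words ys (nextg words g y)) := by
        rw [gvals, dedupF, List.foldl_cons, if_pos hmem]; rfl
      rw [hd]
    · rw [stepB_neg words g o y hmem,
          innerB_fold words ys (nextg words g y) (o ++ [nextg words g y])]
      have hd : dedupF o (gvals words (y :: ys) g)
          = dedupF (o ++ [nextg words g y]) (gvals words ys (nextg words g y)) := by
        rw [gvals, dedupF, List.foldl_cons, if_neg hmem]; rfl
      rw [hd]
theorem sj_win_succ (txt : List String) (hg : goodL txt) (x s : Nat) (hlt : x + s < txt.length) :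
    nextg txt (sj (win txt x s)) ((x + s : Nat) : Int) = sj (win txt x (s+1)) := by
  have hget : PySem.List.pyGetD txt ((x + s : Nat) : Int) "" = txt[x+s] := by
    rw [PySem.List.pyGetD_natCast]; exact List.getD_eq_getElem txt _ hlt
  cases s with
  | zero =>
    have hwin0 : win txt x 0 = [] := rfl
    have hwin1 : win txt x 1 = [txt[x]] := by
      rw [win, ← List.getElem_cons_drop (by omega : x < txt.length)]
      rfl
    rw [hwin0, nextg, if_pos (show sj ([] : List String) = "" from rfl), hget, hwin1]
    rfl
  | succ t =>
    have hne : win txt x (t+1) ≠ [] := by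
      rw [win, ← List.length_pos_iff, List.length_take, List.length_drop]
      omega
    have hsj : sj (win txt x (t+1)) ≠ "" :=
      sj_ne_empty _ hne (fun w hw => (good_win txt hg x (t+1) w hw).1)
    rw [nextg, if_neg hsj, hget]
    have hsnoc : win txt x (t+1+1) = win txt x (t+1) ++ [txt[x+(t+1)]] := by
      rw [win, win, List.take_add_one]
      congr 1
      have hs : t+1 < (txt.drop x).length := by rw [List.length_drop]; omega
      rw [List.getElem?_eq_getElem hs, List.getElem_drop]
      rfl
    rw [hsnoc, sj_snoc _ _ hne]

theorem gvals_eq (txt : List String) (hg : goodL txt) :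
    ∀ (cnt s x : Nat), x + s + cnt ≤ txt.length →
    gvals txt (PySem.List.pyRange ((x+s : Nat) : Int) ((x+s+cnt : Nat) : Int) 1) (sj (win txt x s))
    = (List.range cnt).map (fun j => sj (win txt x (s+j+1)))
  | 0, s, x, h => by
    rw [Nat.add_zero, PySem.List.pyRange_of_pos _ _ (s := 1) (by norm_num),
        if_neg (by omega)]
    rfl
  | cnt+1, s, x, h => by
    rw [PySem.List.pyRange_one_cons (by push_cast; omega), gvals,
        sj_win_succ txt hg x s (by omega)]
    have hb : ((x+s : Nat) : Int) + 1 = ((x+(s+1) : Nat) : Int) := by push_cast; ring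
    have hb2 : ((x+s+(cnt+1) : Nat) : Int) = ((x+(s+1)+cnt : Nat) : Int) := by push_cast; ring
    rw [hb, hb2, gvals_eq txt hg cnt (s+1) x (by omega)]
    rw [List.range_succ_eq_map, List.map_cons, List.map_map]
    rw [Nat.add_zero]
    refine congrArg (sj (win txt x (s+1)) :: ·) ?_
    exact (List.map_congr_left (fun j _ => congrArg (fun t => sj (win txt x t)) (by omega))).symm

theorem outer_fold (words : List String) (n : Int) :
    ∀ (xs : List Int) (o : List String),
    xs.foldl (fun (st : PySem.Set String × List String) x =>
        ((PySem.List.pyRange x (min (x + n) ((words.length : Nat) : Int)) 1).foldl (stepB words) ("", st.1, st.2)).2) (o, o)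
    = (xs.foldl (fun a x => dedupF a (gvals words (PySem.List.pyRange x (min (x + n) ((words.length : Nat) : Int)) 1) "")) o,
       xs.foldl (fun a x => dedupF a (gvals words (PySem.List.pyRange x (min (x + n) ((words.length : Nat) : Int)) 1) "")) o)
  | [], o => rfl
  | x :: xs, o => by
    rw [List.foldl_cons, List.foldl_cons]
    have h1 := innerB_fold words (PySem.List.pyRange x (min (x + n) ((words.length : Nat) : Int)) 1) "" o
    show (xs.foldl (fun (st : PySem.Set String × List String) x =>
        ((PySem.List.pyRange x (min (x + n) ((words.length : Nat) : Int)) 1).foldl (stepB words) ("", st.1, st.2)).2)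
        ((PySem.List.pyRange x (min (x + n) ((words.length : Nat) : Int)) 1).foldl (stepB words) ("", o, o)).2) = _
    rw [h1]
    exact outer_fold words n xs _

theorem B_eq_canon (text_seq : String) (n : Int) :
    ngram_compile_alt text_seq n = canon (PySem.Str.split₀ text_seq) n.toNat := by
  unfold ngram_compile_alt
  set words := PySem.Str.split₀ text_seq with hwords
  have hg := goodL_split₀ text_seq
  rw [← hwords] at hg
  show ((PySem.List.pyRange 0 ((words.length : Nat) : Int) 1).foldl
      (fun (st : PySem.Set String × List String) x =>
        ((PySem.List.pyRange x (min (x + n) ((words.length : Nat) : Int)) 1).foldl (stepB words) ("", st.1, st.2)).2)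
      (([] : List String), ([] : List String))).2 = _
  rw [outer_fold words n _ []]
  show (PySem.List.pyRange 0 ((words.length : Nat) : Int) 1).foldl
      (fun a x => dedupF a (gvals words (PySem.List.pyRange x (min (x + n) ((words.length : Nat) : Int)) 1) "")) [] = _
  rw [PySem.List.pyRange_zero_natCast, List.foldl_map]
  refine PySem.List.foldl_congr_mem _ _ _ _ (fun acc x hx => ?_)
  rw [List.mem_range] at hx
  by_cases hn : (0 : Int) ≤ n
  · obtain ⟨N, rfl⟩ := Int.eq_ofNat_of_zero_le hn
    have hcnt : min ((x : Int) + (N : Int)) ((words.length : Nat) : Int)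
        = ((x + 0 + (min N (words.length - x)) : Nat) : Int) := by push_cast; omega
    rw [hcnt, show ((x : Int)) = ((x + 0 : Nat) : Int) by push_cast; ring,
        show ("" : String) = sj (win words x 0) from rfl,
        gvals_eq words hg (min N (words.length - x)) 0 x (by omega)]
    unfold blockB
    rw [Int.toNat_natCast]
    exact congrArg (dedupF acc) (List.map_congr_left (fun j _ => by rw [Nat.zero_add]))
  · have hempty : PySem.List.pyRange (x : Int) (min ((x : Int) + n) ((words.length : Nat) : Int)) 1 = [] := by
      rw [PySem.List.pyRange_of_pos _ _ (s := 1) (by norm_num), if_neg (by omega)]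
      rfl
    rw [hempty]
    have : n.toNat = 0 := by omega
    rw [this]
    rfl


-- ===== VERDICT (by name: the statement is the Claim_ definition above) =====
theorem ngram_compile_spec : Claim_equal_ngram_compile := by
  intro text_seq n _
  unfold Spec_ngram_compile
  rw [A_eq_canon, B_eq_canon]
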